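-- pv_equiv track=rewrite | github.com/Anmol-Singh-Jaggi/interview-notes | notes/algo-ds-practice/problems/array/first_palindromic.py | first_palindromic
-- ===== SOURCE A (Python) =====
-- from collections import Counter
--
-- def first_palindromic(str):
--     '''
--     There should be at most one char whose frequency is odd.
--     '''
--     chars_counter = Counter(str)
--     odd_count = 0
--     even_count = 0
--     odd_char = ''
--     for key, value in chars_counter.items():
--         if value & 1:
--             odd_char = key
--             odd_count += 1
--         else:
--             even_count += 1
--     if odd_count > 1:
--         return None
--     middle_element = odd_char
--     chars_counter[middle_element] -= 1
--     # Now all the frequencies are even.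
--     chars_sorted = sorted(chars_counter.keys())
--     ans_list = []
--     for char in chars_sorted:
--         chars_counter[char] //= 2
--         ans_list.extend([char] * chars_counter[char])
--     ans_list.append(middle_element)
--     for char in reversed(chars_sorted):
--         ans_list.extend([char] * chars_counter[char])
--         chars_counter[char] //= 2
--
--     assert(not any(value > 0 for value in chars_counter.values()))
--     return ''.join(ans_list)
-- ===== SOURCE B (Python) =====
-- def first_palindromic(str):
--     # Sort all characters, then pair them up in one left-to-right scan:
--     # two equal adjacent chars form a mirrored pair, a lone char must be
--     # the unique middle; a second lone char means no palindrome exists.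
--     s = sorted(str)
--     half = []
--     mid = None
--     i = 0
--     while i < len(s):
--         if i + 1 < len(s) and s[i] == s[i + 1]:
--             half.append(s[i])
--             i += 2
--         else:
--             if mid is not None:
--                 return None
--             mid = s[i]
--             i += 1
--     h = ''.join(half)
--     return h + (mid if mid is not None else '') + h[::-1]
-- ===== Notes on version B (the rewrite author's own statement) =====
-- stated objective: alternative
-- what changed: A counts character frequencies in a Counter and emits count//2 copies per distinct char in two counter-mutating loops around a tracked odd char; B uses no counter at all: it sorts the whole character sequence and does one pair-matching scan over it (two equal adjacent chars become one half char, a lone char is the middle, a second lone char means None), then mirrors the half with a slice.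
-- crash fix: On strings with at most one odd-frequency character and some character occurring >= 4 times, A raises AssertionError at its final assert (the second loop halves the already-halved counts, leaving a positive residue); B returns the lexicographically smallest palindrome permutation. — e.g. on first_palindromic("aaaa"): A raises AssertionError, B returns some "aaaa"
import Mathlib
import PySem

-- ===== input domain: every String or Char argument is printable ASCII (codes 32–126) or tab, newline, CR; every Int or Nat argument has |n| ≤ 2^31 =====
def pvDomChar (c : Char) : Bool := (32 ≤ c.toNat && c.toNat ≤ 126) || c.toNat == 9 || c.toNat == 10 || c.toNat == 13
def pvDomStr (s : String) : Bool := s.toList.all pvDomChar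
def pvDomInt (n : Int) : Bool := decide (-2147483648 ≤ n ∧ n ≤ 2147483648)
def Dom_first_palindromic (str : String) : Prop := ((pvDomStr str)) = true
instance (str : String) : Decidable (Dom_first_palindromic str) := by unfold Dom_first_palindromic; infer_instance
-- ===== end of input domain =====

-- B drops A's Counter entirely: it sorts the whole character sequence and pair-matches
-- adjacent equal chars in one scan (a lone char is the middle), mirroring the half by slice
-- (objective: alternative).

-- Python iterates a string as 1-character strings; both ports handle those
def pvToS (c : Char) : String := String.ofList [c]

-- ===== PORT A =====
def first_palindromic (str : String) : Option String :=
  let chars_counter := PySem.Dict.counter (str.toList.map pvToS)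
  -- for key, value in chars_counter.items(): 'value & 1' on a count (always ≥ 0 here) is value % 2
  let st := chars_counter.items.foldl
    (fun (st : Int × Int × String) kv =>
      if PySem.Int.mod kv.2 2 == 1 then (st.1 + 1, st.2.1, kv.1)
      else (st.1, st.2.1 + 1, st.2.2)) (0, 0, "")
  if st.1 > 1 then none
  else
    let middle_element := st.2.2
    let c1 := chars_counter.modify middle_element 0 (fun v => v - 1)
    let chars_sorted := PySem.List.sorted c1.keys (fun x => x) false
    let p1 := chars_sorted.foldl
      (fun (p : PySem.Dict String Int × List String) ch =>
        let d := p.1.modify ch 0 (fun v => PySem.Int.floordiv v 2)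
        (d, p.2 ++ PySem.List.pyRepeat [ch] (d.getD ch 0))) (c1, [])
    let p2 := chars_sorted.reverse.foldl
      (fun (p : PySem.Dict String Int × List String) ch =>
        (p.1.modify ch 0 (fun v => PySem.Int.floordiv v 2),
         p.2 ++ PySem.List.pyRepeat [ch] (p.1.getD ch 0)))
      (p1.1, p1.2 ++ [middle_element])
    -- Python's final 'assert not any(v > 0 …)' raises exactly on the inputs Pre_ excludes
    some (PySem.Str.join "" p2.2)

-- ===== PORT B =====
-- B's while-loop over the sorted list, as structural recursion on the remaining suffix
-- (state = the half accumulator and the optional middle char, exactly the loop's variables)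
def pvLoopB : List String → List String → Option String → Option (List String × Option String)
  | [], half, mid => some (half, mid)
  | [x], half, mid => if mid.isSome then none else some (half, some x)
  | x :: y :: t, half, mid =>
      if x == y then pvLoopB t (half ++ [x]) mid
      else if mid.isSome then none else pvLoopB (y :: t) half (some x)

def first_palindromic_alt (str : String) : Option String :=
  let s := PySem.List.sorted (str.toList.map pvToS) (fun x => x) false
  match pvLoopB s [] none with
  | none => none
  | some (half, mid) =>
    let h := PySem.Str.join "" half
    -- h[::-1]: slice with step -1, never raises (step ≠ 0)
    some (h ++ mid.getD "" ++ (PySem.Str.slice? h none none (-1)).getD "")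

-- ===== PRECONDITION & SPEC =====
-- Pre_ excludes exactly the inputs on which A raises AssertionError at its final assert:
-- at most one odd-frequency character together with some character occurring ≥ 4 times
-- (the second loop halves the already-halved counts, leaving a positive residue there).
def Pre_first_palindromic (str : String) : Prop :=
  2 ≤ str.toList.dedup.countP (fun ch => str.toList.count ch % 2 == 1) ∨
    str.toList.all (fun ch => str.toList.count ch ≤ 3) = true
instance (str : String) : Decidable (Pre_first_palindromic str) := by
  unfold Pre_first_palindromic; infer_instance

def pvWitness_first_palindromic : String := "aabbc"

-- On strings with at most one odd-frequency character and some character occurring ≥ 4 times,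
-- A raises AssertionError while B returns the lexicographically smallest palindrome permutation.
def Raises_first_palindromic (str : String) : Prop :=
  str.toList.dedup.countP (fun ch => str.toList.count ch % 2 == 1) ≤ 1 ∧
    str.toList.any (fun ch => 4 ≤ str.toList.count ch) = true
instance (str : String) : Decidable (Raises_first_palindromic str) := by
  unfold Raises_first_palindromic; infer_instance
def pvRaiseWitness_first_palindromic : String := "aaaa"
def pvRaiseWitnessOut_first_palindromic : Option String := some "aaaa"

def Spec_first_palindromic (str : String) (out : Option String) : Prop := out = first_palindromic_alt str
instance (str : String) (out : Option String) : Decidable (Spec_first_palindromic str out) := by unfold Spec_first_palindromic; infer_instance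

-- ===== CLAIM (what is proved, stated in full; the proofs are below) =====
def Claim_equal_first_palindromic : Prop := ∀ (str : String), Dom_first_palindromic str → Pre_first_palindromic str → Spec_first_palindromic str (first_palindromic str)

def Claim_raises_first_palindromic : Prop := (∀ (str : String), Dom_first_palindromic str → Raises_first_palindromic str → ¬ Pre_first_palindromic str) ∧ (Dom_first_palindromic (pvRaiseWitness_first_palindromic) ∧ Raises_first_palindromic (pvRaiseWitness_first_palindromic) ∧ first_palindromic_alt (pvRaiseWitness_first_palindromic) = pvRaiseWitnessOut_first_palindromic)

-- ===== LEMMAS AND PROOFS =====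

theorem pv_joinNil (l : List (List Char)) : PySem.Chars.join [] l = l.flatten := by
  induction l with
  | nil => simp [PySem.Chars.join_nil]
  | cons x t ih =>
    cases t with
    | nil => simp [PySem.Chars.join_singleton]
    | cons y t2 => rw [PySem.Chars.join_cons_cons]; simp_all

theorem pv_loop1 (items : List (String × Int)) (a b : Int) (s : String) :
    (items.foldl (fun (st : Int × Int × String) kv =>
      if PySem.Int.mod kv.2 2 == 1 then (st.1 + 1, st.2.1, kv.1)
      else (st.1, st.2.1 + 1, st.2.2)) (a, b, s)).1
    = a + (items.countP (fun kv => PySem.Int.mod kv.2 2 == 1) : Int) := by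
  induction items generalizing a b s with
  | nil => simp
  | cons kv t ih =>
    simp only [List.foldl_cons, List.countP_cons]
    by_cases h : (PySem.Int.mod kv.2 2 == 1) = true
    · rw [if_pos h, ih, if_pos h]; push_cast; ring
    · rw [if_neg h, ih, if_neg h]; push_cast; ring

theorem pv_loop3 (items : List (String × Int)) (a b : Int) (s : String) :
    (items.foldl (fun (st : Int × Int × String) kv =>
      if PySem.Int.mod kv.2 2 == 1 then (st.1 + 1, st.2.1, kv.1)
      else (st.1, st.2.1 + 1, st.2.2)) (a, b, s)).2.2
    = (items.filter (fun kv => PySem.Int.mod kv.2 2 == 1)).foldl (fun _ kv => kv.1) s := by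
  induction items generalizing a b s with
  | nil => simp
  | cons kv t ih =>
    simp only [List.foldl_cons, List.filter_cons]
    by_cases h : (PySem.Int.mod kv.2 2 == 1) = true
    · rw [if_pos h, ih, if_pos h, List.foldl_cons]
    · rw [if_neg h, ih, if_neg h]

theorem pv_lastD (l : List (String × Int)) (h : l.length ≤ 1) (s : String) :
    l.foldl (fun _ kv => kv.1) s = (l.map Prod.fst).headD s := by
  match l with
  | [] => rfl
  | [x] => rfl
  | x :: y :: t => simp at h

theorem pv_forward (ks : List String) (hnd : ks.Nodup) (d0 : PySem.Dict String Int)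
    (acc : List String) :
    ks.foldl (fun (p : PySem.Dict String Int × List String) ch =>
        (p.1.modify ch 0 (fun v => PySem.Int.floordiv v 2),
         p.2 ++ PySem.List.pyRepeat [ch]
           ((p.1.modify ch 0 (fun v => PySem.Int.floordiv v 2)).getD ch 0))) (d0, acc)
    = (ks.foldl (fun d ch => d.modify ch 0 (fun v => PySem.Int.floordiv v 2)) d0,
       acc ++ ks.flatMap (fun ch =>
         List.replicate (PySem.Int.floordiv (d0.getD ch 0) 2).toNat ch)) := by
  induction ks generalizing d0 acc with
  | nil => simp
  | cons ch t ih =>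
    obtain ⟨hch, hnd'⟩ := List.nodup_cons.mp hnd
    simp only [List.foldl_cons]
    rw [ih hnd']
    refine Prod.ext rfl ?_
    simp only [PySem.Dict.getD_modify_self, PySem.List.pyRepeat_singleton,
      List.flatMap_cons, List.append_assoc]
    congr 1
    congr 1
    exact List.flatMap_congr (fun x hx =>
      by rw [PySem.Dict.getD_modify_of_ne _ 0 _ (by rintro rfl; exact hch hx)])

theorem pv_modsGetD (ks : List String) (hnd : ks.Nodup) (d0 : PySem.Dict String Int)
    (k : String) :
    (ks.foldl (fun d ch => d.modify ch 0 (fun v => PySem.Int.floordiv v 2)) d0).getD k 0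
    = if k ∈ ks then PySem.Int.floordiv (d0.getD k 0) 2 else d0.getD k 0 := by
  induction ks generalizing d0 with
  | nil => simp
  | cons ch t ih =>
    obtain ⟨hch, hnd'⟩ := List.nodup_cons.mp hnd
    simp only [List.foldl_cons]
    rw [ih hnd']
    by_cases hk : k ∈ t
    · have hne : k ≠ ch := by rintro rfl; exact hch hk
      rw [if_pos hk, if_pos (List.mem_cons_of_mem _ hk),
        PySem.Dict.getD_modify_of_ne _ 0 _ hne]
    · by_cases he : k = ch
      · subst he
        rw [if_neg hk, if_pos (by simp), PySem.Dict.getD_modify_self]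
      · rw [if_neg hk, if_neg (by simp [he, hk]),
          PySem.Dict.getD_modify_of_ne _ 0 _ he]

theorem pv_backward (ks : List String) (hnd : ks.Nodup) (d1 : PySem.Dict String Int)
    (acc : List String) :
    (ks.foldl (fun (p : PySem.Dict String Int × List String) ch =>
        (p.1.modify ch 0 (fun v => PySem.Int.floordiv v 2),
         p.2 ++ PySem.List.pyRepeat [ch] (p.1.getD ch 0))) (d1, acc)).2
    = acc ++ ks.flatMap (fun ch => List.replicate (d1.getD ch 0).toNat ch) := by
  induction ks generalizing d1 acc with
  | nil => simp
  | cons ch t ih =>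
    obtain ⟨hch, hnd'⟩ := List.nodup_cons.mp hnd
    simp only [List.foldl_cons]
    rw [ih hnd']
    simp only [PySem.List.pyRepeat_singleton, List.flatMap_cons, List.append_assoc]
    congr 1
    congr 1
    exact List.flatMap_congr (fun x hx =>
      by rw [PySem.Dict.getD_modify_of_ne _ 0 _ (by rintro rfl; exact hch hx)])

theorem pv_revFlat (L : List String) (h : ∀ x ∈ L, x.toList.reverse = x.toList) :
    (L.reverse.map String.toList).flatten = ((L.map String.toList).flatten).reverse := by
  have h2 : (L.map String.toList).map List.reverse = L.map String.toList := by
    rw [List.map_map]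
    exact List.map_congr_left (fun x hx => h x hx)
  rw [List.reverse_flatten, List.map_reverse, h2]

-- canonical form both ports are reduced to
def pvCnt (str : String) (k : String) : Int := ((str.toList.map pvToS).count k : Int)
def pvK (str : String) : List String := PySem.Set.ofList (str.toList.map pvToS)
def pvOdds (str : String) : List String :=
  (pvK str).filter (fun ch => PySem.Int.mod (pvCnt str ch) 2 == 1)
def pvHC (str : String) : List Char :=
  (((PySem.List.sorted (pvK str) (fun x => x) false).flatMap
      (fun ch => List.replicate (PySem.Int.floordiv (pvCnt str ch) 2).toNat ch)).map
    String.toList).flatten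
def pvCanon (str : String) : Option String :=
  if (pvOdds str).length > 1 then none
  else some (String.ofList
    (pvHC str ++ ((pvOdds str).headD "").toList ++ (pvHC str).reverse))

theorem pv_toList_pvToS (c : Char) : (pvToS c).toList = [c] := by simp [pvToS]

theorem pv_mem_K {str : String} {x : String} (h : x ∈ pvK str) : ∃ c, x = pvToS c := by
  obtain ⟨c, _, rfl⟩ := List.mem_map.mp ((PySem.Set.mem_ofList _ _).mp h)
  exact ⟨c, rfl⟩

theorem pv_not_mem_l (str : String) : "" ∉ str.toList.map pvToS := by
  intro h
  obtain ⟨c, _, hc⟩ := List.mem_map.mp h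
  have := congrArg String.toList hc
  simp [pv_toList_pvToS] at this

theorem pv_empty_lt {str : String} {x : String} (h : x ∈ pvK str) : "" < x := by
  obtain ⟨c, rfl⟩ := pv_mem_K h
  rw [String.lt_iff_toList_lt, pv_toList_pvToS]
  exact List.nil_lt_cons _ _

theorem pv_back_blocks (S1 : List String) (hnd : S1.Nodup) (c1 : PySem.Dict String Int) :
    S1.reverse.flatMap (fun ch => List.replicate
      ((S1.foldl (fun d ch => d.modify ch 0 (fun v => PySem.Int.floordiv v 2)) c1).getD ch 0).toNat ch)
    = (S1.flatMap (fun ch =>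
        List.replicate (PySem.Int.floordiv (c1.getD ch 0) 2).toNat ch)).reverse := by
  rw [List.flatMap_reverse]
  congr 1
  refine List.flatMap_congr (fun x hx => ?_)
  show (List.replicate _ x).reverse = _
  rw [pv_modsGetD S1 hnd c1 x, if_pos hx, List.reverse_replicate]

theorem pv_join_mirror (FL : List String) (m : String)
    (h1 : ∀ x ∈ FL, x.toList.reverse = x.toList) :
    PySem.Str.join "" ((([] ++ FL) ++ [m]) ++ FL.reverse)
    = String.ofList ((FL.map String.toList).flatten ++ m.toList
        ++ (FL.map String.toList).flatten.reverse) := by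
  rw [← String.toList_inj, PySem.Str.toList_join, String.toList_empty, pv_joinNil,
    String.toList_ofList, List.nil_append, List.map_append, List.map_append,
    List.flatten_append, List.flatten_append, pv_revFlat FL h1]
  simp

theorem pvA_eq (str : String) : first_palindromic str = pvCanon str := by
  simp only [first_palindromic, pvCanon, pvOdds, pvHC, pvK, pvCnt]
  rw [pv_loop1, pv_loop3, PySem.Dict.items_counter]
  rw [List.countP_map, List.filter_map]
  simp only [Function.comp_def]
  rw [List.countP_eq_length_filter]
  split_ifs with h1 h2
  · rfl
  · exfalso; push_cast at h1; omega
  · exfalso; push_cast at h1; omega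
  · -- both return the built palindrome
    rename_i h2
    set l := List.map pvToS str.toList with hl
    set K := PySem.Set.ofList l with hK
    set SB := PySem.List.sorted K (fun x => x) false with hSB
    set O := List.filter (fun x => PySem.Int.mod ((List.count x l : Int)) 2 == 1) K with hOdef
    have hndK : K.Nodup := PySem.Set.nodup_ofList l
    have hndSB : SB.Nodup := ((PySem.List.sorted_perm K (fun x => x) false).symm).nodup hndK
    have hmemSB : ∀ x ∈ SB, x ∈ K := fun x hx => (PySem.List.mem_sorted K _ false x).mp hx
    have hKchar : ∀ x ∈ K, ∃ c, x = pvToS c := fun x hx => pv_mem_K (str := str) hx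
    have hKne : ∀ x ∈ K, x ≠ "" := fun x hx => (pv_empty_lt (str := str) hx).ne'
    have hrev1 : ∀ x ∈ K, x.toList.reverse = x.toList := by
      intro x hx
      obtain ⟨c, rfl⟩ := hKchar x hx
      simp [pv_toList_pvToS]
    have hSBlt : List.Pairwise (fun a b => a < b) SB := by
      have hle := PySem.List.sorted_pairwise K (fun x => x)
      exact (hle.and hndSB).imp (fun h => lt_of_le_of_ne h.1 h.2)
    have hlen : O.length ≤ 1 := by omega
    have hm : List.foldl (fun x kv => kv.1) ""
        (List.map (fun k => (k, (List.count k l : Int))) O) = O.headD "" := by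
      rw [pv_lastD _ (by simpa using hlen)]
      simp [List.map_map]
      cases O.head? <;> rfl
    rw [hm]
    have hrevFL : ∀ x ∈ SB.flatMap (fun ch => List.replicate
        (PySem.Int.floordiv ((List.count ch l : Int)) 2).toNat ch),
        x.toList.reverse = x.toList := by
      intro x hx
      obtain ⟨ch, hch, hxr⟩ := List.mem_flatMap.mp hx
      obtain ⟨-, rfl⟩ := List.mem_replicate.mp hxr
      exact hrev1 _ (hmemSB _ hch)
    clear_value O
    cases O with
    | nil =>
      simp only [List.headD_nil]
      have hc1 : ((PySem.Dict.counter l).modify "" 0 (fun v => v - 1)).keys = K ++ [""] := by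
        rw [PySem.Dict.keys_modify,
          PySem.Dict.keys_insert_of_not_contains _ _ (by
            rw [PySem.Dict.contains_counter]
            simp only [List.contains_eq_mem, decide_eq_false_iff_not]
            exact pv_not_mem_l str),
          PySem.Dict.keys_counter]
      rw [hc1]
      have hs1 : PySem.List.sorted (K ++ [""]) (fun x => x) false = "" :: SB := by
        refine PySem.List.sorted_eq_of_perm_of_pairwise_lt _ _ _ ?_ ?_
        · exact (((PySem.List.sorted_perm K (fun x => x) false).cons "").trans
            (List.perm_append_singleton "" K).symm)
        · exact List.pairwise_cons.mpr ⟨fun y hy => pv_empty_lt (hmemSB y hy), hSBlt⟩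
      rw [hs1]
      have hnd1 : ("" :: SB).Nodup := List.nodup_cons.mpr
        ⟨fun hmem => absurd (pv_empty_lt (hmemSB _ hmem)) (lt_irrefl _), hndSB⟩
      rw [pv_forward _ hnd1]
      dsimp only
      rw [pv_backward _ (List.nodup_reverse.mpr hnd1), pv_back_blocks _ hnd1]
      have hFL : ("" :: SB).flatMap (fun ch => List.replicate
          (PySem.Int.floordiv ((((PySem.Dict.counter l).modify "" 0 (fun v => v - 1))).getD ch 0) 2).toNat ch)
          = SB.flatMap (fun ch => List.replicate
            (PySem.Int.floordiv ((List.count ch l : Int)) 2).toNat ch) := by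
        rw [List.flatMap_cons]
        have hzero : (PySem.Int.floordiv
            ((((PySem.Dict.counter l).modify "" 0 (fun v => v - 1))).getD "" 0) 2).toNat = 0 := by
          rw [PySem.Dict.getD_modify_self, PySem.Dict.getD_counter,
            List.count_eq_zero.mpr (pv_not_mem_l str)]
          norm_num
        rw [hzero]
        simp only [List.replicate_zero, List.nil_append]
        refine List.flatMap_congr (fun x hx => ?_)
        rw [PySem.Dict.getD_modify_of_ne _ 0 _ (hKne x (hmemSB x hx)), PySem.Dict.getD_counter]
      rw [hFL, pv_join_mirror _ "" hrevFL]
    | cons k t =>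
      have ht : t = [] := by
        cases t with
        | nil => rfl
        | cons a u => simp at hlen
      subst ht
      simp only [List.headD_cons]
      have hkK : k ∈ K := List.mem_of_mem_filter (hOdef ▸ List.mem_cons_self)
      have hodd : PySem.Int.mod ((List.count k l : Int)) 2 = 1 := by
        have := List.of_mem_filter (p := fun x => PySem.Int.mod ((List.count x l : Int)) 2 == 1)
          (hOdef ▸ List.mem_cons_self)
        exact beq_iff_eq.mp this
      have hc1 : ((PySem.Dict.counter l).modify k 0 (fun v => v - 1)).keys = K := by
        rw [PySem.Dict.keys_modify,
          PySem.Dict.keys_insert_of_contains _ _ (by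
            rw [PySem.Dict.contains_counter]
            have hkl : k ∈ l := (PySem.Set.mem_ofList l k).mp hkK
            simp only [List.contains_eq_mem, decide_eq_true_eq]
            exact hkl),
          PySem.Dict.keys_counter]
      rw [hc1, ← hSB]
      rw [pv_forward _ hndSB]
      dsimp only
      rw [pv_backward _ (List.nodup_reverse.mpr hndSB), pv_back_blocks _ hndSB]
      have harith : PySem.Int.floordiv ((List.count k l : Int) - 1) 2
          = PySem.Int.floordiv ((List.count k l : Int)) 2 := by
        rw [PySem.Int.mod_eq_emod_of_pos (by norm_num)] at hodd
        rw [PySem.Int.floordiv_eq_ediv_of_pos (by norm_num),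
          PySem.Int.floordiv_eq_ediv_of_pos (by norm_num)]
        omega
      have hFL : SB.flatMap (fun ch => List.replicate
          (PySem.Int.floordiv ((((PySem.Dict.counter l).modify k 0 (fun v => v - 1))).getD ch 0) 2).toNat ch)
          = SB.flatMap (fun ch => List.replicate
            (PySem.Int.floordiv ((List.count ch l : Int)) 2).toNat ch) := by
        refine List.flatMap_congr (fun x hx => ?_)
        by_cases hxk : x = k
        · subst hxk
          rw [PySem.Dict.getD_modify_self, PySem.Dict.getD_counter, harith]
        · rw [PySem.Dict.getD_modify_of_ne _ 0 _ hxk, PySem.Dict.getD_counter]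
      rw [hFL, pv_join_mirror _ k hrevFL]

-- ---------- B-side lemmas ----------

-- arithmetic bridges between canon's Int counts and B's Nat counts
theorem pv_half_toNat (n : Nat) : (PySem.Int.floordiv (n : Int) 2).toNat = n / 2 := by
  rw [PySem.Int.floordiv_eq_ediv_of_pos (by norm_num)]
  omega

theorem pv_oddP (n : Nat) : (PySem.Int.mod (n : Int) 2 == 1) = (n % 2 == 1) := by
  rw [PySem.Int.mod_eq_emod_of_pos (by norm_num)]
  by_cases h : n % 2 = 1
  · simp only [h]
    have : (n : Int) % 2 = 1 := by omega
    simp [this]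
  · have : ¬ ((n : Int) % 2 = 1) := by omega
    simp [h, this]

-- a run of equal elements is weakly sorted
theorem pv_pairwise_replicate (n : Nat) (a : String) :
    (List.replicate n a).Pairwise (fun x y : String => x ≤ y) := by
  induction n with
  | zero => simp
  | succ m ih =>
    rw [List.replicate_succ]
    exact List.pairwise_cons.mpr
      ⟨fun y hy => (List.eq_of_mem_replicate hy) ▸ le_refl a, ih⟩

theorem pv_blocks_pairwise (SB : List String) (cnt : String → Nat)
    (h : SB.Pairwise (fun a b => a < b)) :
    (SB.flatMap (fun ch => List.replicate (cnt ch) ch)).Pairwise (fun x y : String => x ≤ y) := by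
  induction SB with
  | nil => simp
  | cons ch t ih =>
    obtain ⟨hch, ht⟩ := List.pairwise_cons.mp h
    rw [List.flatMap_cons]
    refine List.pairwise_append.mpr ⟨pv_pairwise_replicate _ _, ih ht, ?_⟩
    intro a ha b hb
    have ha2 : a = ch := List.eq_of_mem_replicate ha
    obtain ⟨c2, hc2, hb2⟩ := List.mem_flatMap.mp hb
    have hb3 : b = c2 := List.eq_of_mem_replicate hb2
    rw [ha2, hb3]
    exact (hch c2 hc2).le

theorem pv_count_blocks (K : List String) (hnd : K.Nodup) (cnt : String → Nat) (x : String) :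
    (K.flatMap (fun ch => List.replicate (cnt ch) ch)).count x
    = if x ∈ K then cnt x else 0 := by
  induction K with
  | nil => simp
  | cons ch t ih =>
    obtain ⟨hch, ht⟩ := List.nodup_cons.mp hnd
    rw [List.flatMap_cons, List.count_append, ih ht, List.count_replicate]
    by_cases hx : x = ch
    · subst hx
      rw [if_pos (by simp), if_pos List.mem_cons_self, if_neg (fun hm => hch hm)]
      simp
    · rw [if_neg (by simpa using Ne.symm hx)]
      by_cases hxt : x ∈ t
      · rw [if_pos hxt, if_pos (List.mem_cons_of_mem _ hxt)]
        simp
      · rw [if_neg hxt, if_neg (by simp [hx, hxt])]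

theorem pv_perm_blocks (l : List String) :
    ((PySem.Set.ofList l).flatMap (fun ch => List.replicate (l.count ch) ch)).Perm l := by
  rw [List.perm_iff_count]
  intro x
  rw [pv_count_blocks _ (PySem.Set.nodup_ofList l)]
  by_cases hx : x ∈ l
  · rw [if_pos ((PySem.Set.mem_ofList l x).mpr hx)]
  · rw [if_neg (fun h => hx ((PySem.Set.mem_ofList l x).mp h)),
      (List.count_eq_zero).mpr hx]

-- the sorted character list is the concatenation of the sorted keys' uniform runs
theorem pv_sorted_blocks (l : List String) :
    PySem.List.sorted l (fun x => x) false
    = (PySem.List.sorted (PySem.Set.ofList l) (fun x => x) false).flatMap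
        (fun ch => List.replicate (l.count ch) ch) := by
  refine PySem.List.sorted_id_eq_of_perm_of_pairwise _ _ ?_ ?_
  · exact ((PySem.List.sorted_perm (PySem.Set.ofList l) (fun x => x) false).flatMap
      (fun a _ => List.Perm.refl _)).trans (pv_perm_blocks l)
  · exact pv_blocks_pairwise _ _ (PySem.List.sorted_ofList_pairwise_lt l)

-- the pair-matching scan across one uniform run
theorem pv_loopB_run (n : Nat) (ch : String) (rest half : List String) (mid : Option String)
    (hne : ∀ y ∈ rest.head?, y ≠ ch) :
    pvLoopB (List.replicate n ch ++ rest) half mid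
    = if n % 2 = 0 then pvLoopB rest (half ++ List.replicate (n / 2) ch) mid
      else if mid.isSome then none
      else pvLoopB rest (half ++ List.replicate (n / 2) ch) (some ch) := by
  induction n using Nat.strong_induction_on generalizing half mid with
  | _ n ih =>
    match n with
    | 0 => simp
    | 1 =>
      cases rest with
      | nil =>
        cases mid <;> simp [pvLoopB]
      | cons y t =>
        have hy : y ≠ ch := hne y rfl
        have hbeq : (ch == y) = false := beq_eq_false_iff_ne.mpr (fun h => hy h.symm)
        simp [pvLoopB, hbeq]
    | (m + 2) =>
      have hrep : List.replicate (m + 2) ch ++ rest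
          = ch :: ch :: (List.replicate m ch ++ rest) := by
        simp [List.replicate_succ]
      rw [hrep]
      show (if (ch == ch) = true then
          pvLoopB (List.replicate m ch ++ rest) (half ++ [ch]) mid
        else _) = _
      rw [if_pos (by simp)]
      rw [ih m (by omega) _ _]
      have hmod : (m + 2) % 2 = m % 2 := by omega
      have hdiv : (m + 2) / 2 = m / 2 + 1 := by omega
      have hacc : half ++ [ch] ++ List.replicate (m / 2) ch
          = half ++ List.replicate ((m + 2) / 2) ch := by
        rw [hdiv, List.replicate_succ, List.append_assoc]
        rfl
      rw [hmod, hacc]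

-- the full scan over the block decomposition
def pvMC : Option String → Nat
  | none => 0
  | some _ => 1

theorem pvMC_none : pvMC none = 0 := rfl
theorem pvMC_some (m : String) : pvMC (some m) = 1 := rfl

theorem pv_loopB_blocks (SB : List String) (cnt : String → Nat) (half : List String)
    (mid : Option String) (hnd : SB.Nodup) (hpos : ∀ ch ∈ SB, 0 < cnt ch) :
    pvLoopB (SB.flatMap (fun ch => List.replicate (cnt ch) ch)) half mid
    = if 2 ≤ pvMC mid + (SB.filter (fun ch => cnt ch % 2 == 1)).length then none
      else some (half ++ SB.flatMap (fun ch => List.replicate (cnt ch / 2) ch),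
                 mid.or ((SB.filter (fun ch => cnt ch % 2 == 1)).head?)) := by
  induction SB generalizing half mid with
  | nil =>
    cases mid <;> simp [pvLoopB, pvMC]
  | cons ch t ih =>
    obtain ⟨hch, ht⟩ := List.nodup_cons.mp hnd
    have hpos' : ∀ c ∈ t, 0 < cnt c := fun c hc => hpos c (List.mem_cons_of_mem _ hc)
    have hne : ∀ y ∈ (t.flatMap (fun c => List.replicate (cnt c) c)).head?, y ≠ ch := by
      intro y hy
      obtain ⟨c, hc, hy2⟩ := List.mem_flatMap.mp (List.mem_of_mem_head? hy)
      have : y = c := List.eq_of_mem_replicate hy2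
      subst this
      exact fun h => hch (h ▸ hc)
    rw [List.flatMap_cons, pv_loopB_run _ _ _ _ _ hne]
    by_cases hev : cnt ch % 2 = 0
    · rw [if_pos hev, ih _ _ ht hpos',
        List.filter_cons_of_neg (by simp [hev]), List.flatMap_cons, ← List.append_assoc]
    · have hodd : cnt ch % 2 = 1 := by omega
      rw [if_neg (by omega), List.filter_cons_of_pos (by simp [hodd])]
      cases mid with
      | some m =>
        rw [if_pos (show ((some m : Option String).isSome) = true from rfl),
          if_pos (by simp only [pvMC_some, List.length_cons]; omega)]
      | none =>
        rw [if_neg (show ¬ ((none : Option String).isSome = true) by simp)]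
        rw [ih _ _ ht hpos']
        by_cases hlen : 2 ≤ 1 + (t.filter (fun c => cnt c % 2 == 1)).length
        · rw [if_pos (by simp only [pvMC_some]; omega),
            if_pos (by simp only [pvMC_none, List.length_cons]; omega)]
        · have htnil : t.filter (fun c => cnt c % 2 == 1) = [] :=
            List.length_eq_zero_iff.mp (by omega)
          rw [if_neg (by simp only [pvMC_some]; omega),
            if_neg (by simp only [pvMC_none, List.length_cons, htnil, List.length_nil]; omega)]
          rw [htnil, List.flatMap_cons, ← List.append_assoc]
          simp

theorem pv_headD (L : List String) : L.head?.getD "" = L.headD "" := by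
  cases L <;> rfl

-- a permutation of length ≤ 1 is an equality
theorem pv_perm_short {l₁ l₂ : List String} (h : l₁.Perm l₂) (hlen : l₁.length ≤ 1) :
    l₁ = l₂ := by
  match l₁, hlen with
  | [], _ => exact (List.Perm.nil_eq h).symm ▸ rfl
  | [x], _ => exact (List.perm_singleton.mp h.symm).symm

theorem pvB_eq (str : String) : first_palindromic_alt str = pvCanon str := by
  simp only [first_palindromic_alt, pvCanon, pvOdds, pvHC]
  set l := List.map pvToS str.toList with hl
  have hKl : pvK str = PySem.Set.ofList l := rfl
  set K := PySem.Set.ofList l with hK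
  set SB := PySem.List.sorted K (fun x => x) false with hSB
  have hndK : K.Nodup := PySem.Set.nodup_ofList l
  have hndSB : SB.Nodup := ((PySem.List.sorted_perm K (fun x => x) false).symm).nodup hndK
  have hmemSB : ∀ x ∈ SB, x ∈ K := fun x hx => (PySem.List.mem_sorted K _ false x).mp hx
  have hpos : ∀ ch ∈ SB, 0 < l.count ch := by
    intro ch hch
    exact List.count_pos_iff.mpr ((PySem.Set.mem_ofList l ch).mp (hmemSB ch hch))
  rw [pv_sorted_blocks l, ← hK, ← hSB, pv_loopB_blocks SB _ [] none hndSB hpos]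
  -- bridge the Int-valued odd predicate of the canon to the Nat one of the scan
  have hfilK : K.filter (fun ch => PySem.Int.mod (pvCnt str ch) 2 == 1)
      = K.filter (fun ch => l.count ch % 2 == 1) :=
    List.filter_congr (fun x _ => pv_oddP (l.count x))
  have hpermF : (SB.filter (fun ch => l.count ch % 2 == 1)).Perm
      (K.filter (fun ch => l.count ch % 2 == 1)) :=
    (PySem.List.sorted_perm K (fun x => x) false).filter _
  have hlenF : (SB.filter (fun ch => l.count ch % 2 == 1)).length
      = (K.filter (fun ch => l.count ch % 2 == 1)).length := hpermF.length_eq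
  simp only [hKl, hfilK]
  by_cases hmany : 2 ≤ (K.filter (fun ch => l.count ch % 2 == 1)).length
  · rw [if_pos (by simp only [pvMC_none, hlenF]; omega), if_pos (by omega)]
  · rw [if_neg (by simp only [pvMC_none, hlenF]; omega), if_neg (by omega)]
    have heqF : SB.filter (fun ch => l.count ch % 2 == 1)
        = K.filter (fun ch => l.count ch % 2 == 1) :=
      pv_perm_short hpermF (by omega)
    -- the scan's half equals the canon's run-length-halved blocks
    have hhalf : SB.flatMap (fun ch => List.replicate (l.count ch / 2) ch)
        = SB.flatMap (fun ch =>
            List.replicate (PySem.Int.floordiv (pvCnt str ch) 2).toNat ch) := by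
      refine List.flatMap_congr (fun x _ => ?_)
      rw [show pvCnt str x = ((l.count x : Nat) : Int) from rfl, pv_half_toNat]
    show some _ = some _
    refine congrArg some ?_
    rw [← String.toList_inj]
    rw [PySem.Str.slice?_none_none_neg_one, Option.getD_some]
    simp only [String.toList_append, String.toList_ofList, PySem.Str.toList_join,
      String.toList_empty, pv_joinNil]
    rw [hhalf, heqF, Option.none_or, pv_headD]
    simp only [List.nil_append, ← hSB]

-- ===== VERDICT (by name: the statement is the Claim_ definition above) =====
theorem first_palindromic_spec : Claim_equal_first_palindromic := by
  intro str _ _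
  unfold Spec_first_palindromic
  rw [pvA_eq, pvB_eq]

set_option maxRecDepth 2048 in
theorem first_palindromic_raises : Claim_raises_first_palindromic := by
  unfold Claim_raises_first_palindromic
  constructor
  · intro s _ hr hp
    obtain ⟨h1, hany⟩ := hr
    obtain ⟨ch, hm, h4⟩ := List.any_eq_true.mp hany
    rcases hp with h2 | h3
    · omega
    · have := List.all_eq_true.mp h3 ch hm
      simp only [decide_eq_true_eq] at this h4
      omega
  · refine ⟨by decide, by decide, by rw [pvB_eq]; decide⟩

-- self-check: the concrete value B returns on the raise-region witness, extracted from the claim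
theorem first_palindromic_raises_witness :
    first_palindromic_alt pvRaiseWitness_first_palindromic = pvRaiseWitnessOut_first_palindromic := by
  have h := first_palindromic_raises
  unfold Claim_raises_first_palindromic at h
  exact h.2.2.2
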